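-- pv_equiv track=rewrite | github.com/yemaney/yemaney.github.io | DSA/Graphs/SingleCycleCheck.py | hasSingleCycle
-- ===== SOURCE A (Python) =====
-- def hasSingleCycle(array: list[int]) -> bool:
--     """
--     Start at index 0 and travel through the array. If the start index is visited
--     again before number of visits is equal to len of array, early exist false.
--     Else return the last index visited is 0.
--
--     time: O(n) -> traversing entire array
--     space: O(1) -> only keeping track of two integers
--     """
--
--     numVisits = 0
--     currentIdx = 0
--     while numVisits < len(array):
--         if numVisits > 0 and currentIdx == 0:
--             return False
--         numVisits += 1
--         currentIdx = (currentIdx + array[currentIdx]) % len(array)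
--
--     return currentIdx == 0
-- ===== SOURCE B (Python) =====
-- def hasSingleCycle(array: list[int]) -> bool:
--     n = len(array)
--     if n == 0:
--         return True
--     # successor map of the jump graph
--     succ = [(i + array[i]) % n for i in range(n)]
--     # a single cycle through all nodes requires succ to be a permutation of 0..n-1
--     if sorted(succ) != list(range(n)):
--         return False
--     # and every node reachable from 0: set-valued fixpoint iteration (BFS closure)
--     seen = {0}
--     frontier = {0}
--     while frontier:
--         frontier = {succ[i] for i in frontier} - seen
--         seen |= frontier
--     return len(seen) == n
-- ===== Notes on version B (the rewrite author's own statement) =====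
-- stated objective: alternative
-- what changed: B abandons A's counted walk (step counter, early exit on revisiting 0): it builds the successor map of the jump graph, tests by sorting that it is a permutation of range(n), and then checks that the set of indices reachable from 0 under a set-valued fixpoint iteration (BFS closure) covers all n indices.
import Mathlib
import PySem

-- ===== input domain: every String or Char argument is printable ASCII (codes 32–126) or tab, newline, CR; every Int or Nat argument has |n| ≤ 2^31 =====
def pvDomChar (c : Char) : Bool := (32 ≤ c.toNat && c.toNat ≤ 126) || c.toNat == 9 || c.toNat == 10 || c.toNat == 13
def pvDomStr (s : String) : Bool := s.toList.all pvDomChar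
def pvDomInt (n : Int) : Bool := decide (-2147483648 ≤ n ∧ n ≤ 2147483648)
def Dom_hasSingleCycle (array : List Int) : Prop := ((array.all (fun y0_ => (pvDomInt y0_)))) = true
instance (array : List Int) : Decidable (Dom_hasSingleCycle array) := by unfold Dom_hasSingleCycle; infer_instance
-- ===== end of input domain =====

-- B replaces A's counted walk (step counter + special test for returning to 0) by a different
-- algorithm: build the successor map of the jump graph, test that it is a permutation of
-- range(n) by sorting, then compute the set of indices reachable from 0 by set-valued
-- fixpoint iteration and check it covers all n indices; same asymptotic cost up to sorting.

-- ===== PORT A =====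
-- A's while loop: fuel = len(array) - numVisits.  array[currentIdx] never raises here:
-- currentIdx is 0 at entry and afterwards always (… % len) with len > 0, so it lies in
-- [0, len); pyGetD … 0 is therefore exact on every reachable state.
def hasSingleCycleLoop (array : List Int) (fuel numVisits : Nat) (currentIdx : Int) : Bool :=
  match fuel with
  | 0 => currentIdx == 0
  | f + 1 =>
    if numVisits > 0 && currentIdx == 0 then false
    else hasSingleCycleLoop array f (numVisits + 1)
      (PySem.Int.mod (currentIdx + PySem.List.pyGetD array currentIdx 0) (array.length : Int))

def hasSingleCycle (array : List Int) : Bool :=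
  hasSingleCycleLoop array array.length 0 0

-- ===== PORT B =====
-- 'while frontier: frontier = {succ[i] for i in frontier} - seen; seen |= frontier', ported
-- with fuel n: seen ⊆ {0} ∪ succ-values (n distinct candidates) grows on every continuing
-- round, so the loop runs at most n times and at fuel 0 the frontier is already empty.
-- succ[i] is pyGetD succ i 0 (exact: every frontier element is a succ value in [0, n)).
def bfsLoop (succ : List Int) (fuel : Nat) (seen frontier : PySem.Set Int) : PySem.Set Int :=
  match fuel with
  | 0 => seen
  | f + 1 =>
    if frontier = [] then seen
    else
      let fr' := PySem.Set.diff
        (PySem.Set.ofList (frontier.map (fun i => PySem.List.pyGetD succ i 0))) seen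
      bfsLoop succ f (PySem.Set.union seen fr') fr'

def hasSingleCycle_alt (array : List Int) : Bool :=
  let n := array.length
  if n = 0 then true
  else
    let succ := (PySem.List.pyRange 0 (n : Int) 1).map
      (fun i => PySem.Int.mod (i + PySem.List.pyGetD array i 0) (n : Int))
    if !(PySem.List.sorted succ (fun x => x) false == PySem.List.pyRange 0 (n : Int) 1) then
      false
    else
      PySem.Set.len (bfsLoop succ n (PySem.Set.ofList [0]) (PySem.Set.ofList [0])) == (n : Int)

-- ===== PRECONDITION & SPEC =====
def Spec_hasSingleCycle (array : List Int) (out : Bool) : Prop := out = hasSingleCycle_alt array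
instance (array : List Int) (out : Bool) : Decidable (Spec_hasSingleCycle array out) := by unfold Spec_hasSingleCycle; infer_instance

-- ===== CLAIM (what is proved, stated in full; the proofs are below) =====
def Claim_equal_hasSingleCycle : Prop := ∀ (array : List Int), Dom_hasSingleCycle array → Spec_hasSingleCycle array (hasSingleCycle array)

-- ===== LEMMAS AND PROOFS =====

-- the jump step both programs perform, and the orbit of index 0 under it
def pvStep (array : List Int) (i : Int) : Int :=
  PySem.Int.mod (i + PySem.List.pyGetD array i 0) (array.length : Int)

def pvOrb (array : List Int) : Nat → Int
  | 0 => 0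
  | k + 1 => pvStep array (pvOrb array k)

-- the first t orbit points, in order
def pvL (array : List Int) (t : Nat) : List Int := (List.range t).map (pvOrb array)

lemma pvStep_range (array : List Int) (h : array ≠ []) (i : Int) :
    0 ≤ pvStep array i ∧ pvStep array i < (array.length : Int) := by
  have hn : (0 : Int) < (array.length : Int) := by
    simpa using List.length_pos_iff.mpr h
  exact ⟨PySem.Int.mod_nonneg _ hn, PySem.Int.mod_lt _ hn⟩

lemma pvOrb_range (array : List Int) (h : array ≠ []) (k : Nat) :
    0 ≤ pvOrb array k ∧ pvOrb array k < (array.length : Int) := by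
  cases k with
  | zero =>
    constructor
    · simp [pvOrb]
    · simpa [pvOrb] using List.length_pos_iff.mpr h
  | succ k => exact pvStep_range array h _

-- shifting equal orbit points forward
lemma pvOrb_congr_add (array : List Int) {i j : Nat} (h : pvOrb array i = pvOrb array j) :
    ∀ d, pvOrb array (i + d) = pvOrb array (j + d) := by
  intro d
  induction d with
  | zero => simpa using h
  | succ d ih => simpa [pvOrb, Nat.add_succ] using congrArg (pvStep array) ih

-- k-fold application of the step, consuming from the front
def pvIter (array : List Int) : Nat → Int → Int
  | 0, i => i
  | k + 1, i => pvIter array k (pvStep array i)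

lemma pvIter_succ_right (array : List Int) (k : Nat) (i : Int) :
    pvIter array (k + 1) i = pvStep array (pvIter array k i) := by
  induction k generalizing i with
  | zero => rfl
  | succ k ih => exact ih (pvStep array i)

lemma pvOrb_eq_iter (array : List Int) (k : Nat) : pvOrb array k = pvIter array k 0 := by
  induction k with
  | zero => rfl
  | succ k ih => rw [pvOrb, ih, pvIter_succ_right]

-- A's loop, once numVisits is positive, tests first return to 0
lemma pvLoopIff (array : List Int) :
    ∀ (fuel nv : Nat) (i : Int), 0 < nv →
      (hasSingleCycleLoop array fuel nv i = true ↔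
        (pvIter array fuel i = 0 ∧ ∀ k < fuel, pvIter array k i ≠ 0)) := by
  intro fuel
  induction fuel with
  | zero =>
    intro nv i _
    simp [hasSingleCycleLoop, pvIter]
  | succ f ih =>
    intro nv i hnv
    show (if nv > 0 && i == 0 then false
      else hasSingleCycleLoop array f (nv + 1) (pvStep array i)) = true ↔ _
    by_cases hi : i = 0
    · subst hi
      rw [if_pos (by simp [hnv])]
      constructor
      · intro h; cases h
      · rintro ⟨-, h0⟩
        exact absurd rfl (h0 0 (Nat.succ_pos f))
    · rw [if_neg (by simp [hi]), ih (nv + 1) (pvStep array i) (Nat.succ_pos nv)]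
      constructor
      · rintro ⟨h1, h2⟩
        refine ⟨h1, ?_⟩
        intro k hk
        cases k with
        | zero => simpa [pvIter] using hi
        | succ k => exact h2 k (by omega)
      · rintro ⟨h1, h2⟩
        exact ⟨h1, fun k hk => h2 (k + 1) (by omega)⟩

-- characterisation of A for nonempty arrays: first return to 0 is exactly at step n
lemma pvA_iff (array : List Int) (h : array ≠ []) :
    (hasSingleCycle array = true ↔
      (pvOrb array array.length = 0 ∧ ∀ j, 0 < j → j < array.length → pvOrb array j ≠ 0)) := by
  obtain ⟨m, hm⟩ : ∃ m, array.length = m + 1 := by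
    cases harr : array.length with
    | zero => exact absurd (List.length_eq_zero_iff.mp harr) h
    | succ m => exact ⟨m, rfl⟩
  unfold hasSingleCycle
  rw [hm]
  show (if 0 > 0 && (0 : Int) == 0 then false
    else hasSingleCycleLoop array m (0 + 1) (pvStep array 0)) = true ↔ _
  rw [if_neg (by simp)]
  rw [pvLoopIff array m 1 (pvStep array 0) Nat.one_pos]
  have horb : ∀ k : Nat, pvOrb array (k + 1) = pvIter array k (pvStep array 0) := by
    intro k
    rw [pvOrb_eq_iter]
    rfl
  constructor
  · rintro ⟨h1, h2⟩
    refine ⟨by rw [horb m] at *; exact h1, ?_⟩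
    intro j hj0 hjm
    obtain ⟨k, rfl⟩ : ∃ k, j = k + 1 := ⟨j - 1, by omega⟩
    rw [horb]
    exact h2 k (by omega)
  · rintro ⟨h1, h2⟩
    refine ⟨by rw [← horb m]; exact h1, ?_⟩
    intro k hk
    rw [← horb]
    exact h2 (k + 1) (by omega) (by omega)

-- B's successor list, as the ports build it
def pvSucc (array : List Int) : List Int :=
  (PySem.List.pyRange 0 (array.length : Int) 1).map (pvStep array)

lemma pvSucc_get (array : List Int) {i : Int} (h0 : 0 ≤ i) (h1 : i < (array.length : Int)) :
    PySem.List.pyGetD (pvSucc array) i 0 = pvStep array i :=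
  PySem.List.pyGetD_map_pyRange_of_nonneg (pvStep array) _ i 0 h0 h1

-- membership in the orbit-prefix list
lemma pvL_mem (array : List Int) (t : Nat) (y : Int) :
    y ∈ pvL array t ↔ ∃ k, k < t ∧ pvOrb array k = y := by
  simp [pvL]

lemma pvL_length (array : List Int) (t : Nat) : (pvL array t).length = t := by
  simp [pvL]

-- small computation facts about PySem.Set operations used by bfsLoop
lemma pvSet_ofList_singleton (x : Int) : PySem.Set.ofList [x] = [x] := rfl

lemma pvSet_diff_singleton (y : Int) (s : PySem.Set Int) :
    PySem.Set.diff [y] s = if y ∈ s then [] else [y] := by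
  simp [PySem.Set.diff, List.filter]
  split_ifs with h <;> simp [h]

lemma pvSet_union_singleton (s : PySem.Set Int) (y : Int) :
    PySem.Set.union s [y] = PySem.Set.add s y := rfl

lemma pvSet_union_nil (s : PySem.Set Int) : PySem.Set.union s [] = s := rfl

lemma pvBfsLoop_nil (succ : List Int) (f : Nat) (s : PySem.Set Int) :
    bfsLoop succ f s [] = s := by
  cases f <;> rfl

-- the workhorse: when the orbit prefix 0..m-1 is duplicate-free and step m repeats,
-- the BFS closure computes exactly that prefix
lemma pvBFS (array : List Int) (h : array ≠ []) (m : Nat)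
    (hd : (pvL array m).Nodup) (hrep : pvOrb array m ∈ pvL array m) :
    ∀ (f t : Nat), t < m → m - t ≤ f →
      bfsLoop (pvSucc array) f (pvL array (t + 1)) [pvOrb array t] = pvL array m := by
  intro f
  induction f with
  | zero => intro t ht hf; omega
  | succ f ih =>
    intro t ht hf
    show (if ([pvOrb array t] : List Int) = [] then pvL array (t + 1)
      else _) = pvL array m
    rw [if_neg (by simp)]
    have hg : [pvOrb array t].map (fun i => PySem.List.pyGetD (pvSucc array) i 0)
        = [pvOrb array (t + 1)] := by
      have hr := pvOrb_range array h t
      simp [List.map, pvSucc_get array hr.1 hr.2]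
      rfl
    by_cases hend : t + 1 = m
    · have hin : pvOrb array (t + 1) ∈ pvL array (t + 1) := by
        rw [hend]; rw [hend] at *; exact hrep
      have : PySem.Set.diff (PySem.Set.ofList ([pvOrb array t].map
          (fun i => PySem.List.pyGetD (pvSucc array) i 0))) (pvL array (t + 1)) = [] := by
        rw [hg, pvSet_ofList_singleton, pvSet_diff_singleton, if_pos hin]
      rw [this]
      show bfsLoop (pvSucc array) f (PySem.Set.union (pvL array (t + 1)) []) [] = pvL array m
      rw [pvSet_union_nil, pvBfsLoop_nil, hend]
    · have hlt : t + 1 < m := by omega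
      have hnin : pvOrb array (t + 1) ∉ pvL array (t + 1) := by
        intro hmem
        obtain ⟨k, hk, hke⟩ := (pvL_mem array (t + 1) _).mp hmem
        have hinj := List.inj_on_of_nodup_map (l := List.range m) (f := pvOrb array)
          (by simpa [pvL] using hd)
        have : k = t + 1 := hinj (List.mem_range.mpr (by omega))
          (List.mem_range.mpr hlt) hke
        omega
      have hdiff : PySem.Set.diff (PySem.Set.ofList ([pvOrb array t].map
          (fun i => PySem.List.pyGetD (pvSucc array) i 0))) (pvL array (t + 1))
          = [pvOrb array (t + 1)] := by
        rw [hg, pvSet_ofList_singleton, pvSet_diff_singleton, if_neg hnin]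
      rw [hdiff]
      show bfsLoop (pvSucc array) f
        (PySem.Set.union (pvL array (t + 1)) [pvOrb array (t + 1)]) [pvOrb array (t + 1)]
        = pvL array m
      rw [pvSet_union_singleton, PySem.Set.add_of_not_mem hnin]
      have hL : pvL array (t + 1) ++ [pvOrb array (t + 1)] = pvL array (t + 2) := by
        simp [pvL, List.range_succ]
      rw [hL]
      exact ih (t + 1) hlt (by omega)

-- B's sorted-comparison test holds exactly when succ is a permutation of range(n)
lemma pvSortedTest_iff (array : List Int) :
    (PySem.List.sorted (pvSucc array) (fun x => x) false
        == PySem.List.pyRange 0 (array.length : Int) 1) = true ↔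
      (pvSucc array).Perm (PySem.List.pyRange 0 (array.length : Int) 1) := by
  rw [beq_iff_eq]
  constructor
  · intro hs
    have hp := PySem.List.sorted_perm (pvSucc array) (fun x => x) false
    rw [hs] at hp
    exact hp.symm
  · intro hp
    exact PySem.List.sorted_eq_of_perm_of_pairwise_lt _ _ _ hp.symm
      (PySem.List.pairwise_lt_pyRange_one _ _)

-- a permutation successor map is injective on [0, n)
lemma pvInj_of_perm (array : List Int)
    (hp : (pvSucc array).Perm (PySem.List.pyRange 0 (array.length : Int) 1)) :
    ∀ x y : Int, 0 ≤ x → x < (array.length : Int) → 0 ≤ y → y < (array.length : Int) →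
      pvStep array x = pvStep array y → x = y := by
  intro x y hx0 hx1 hy0 hy1 hxy
  have hnd : (pvSucc array).Nodup := hp.nodup_iff.mpr (PySem.List.nodup_pyRange_one _ _)
  exact List.inj_on_of_nodup_map (by simpa [pvSucc] using hnd)
    (PySem.List.mem_pyRange_one.mpr ⟨hx0, hx1⟩)
    (PySem.List.mem_pyRange_one.mpr ⟨hy0, hy1⟩) hxy

-- an injective step can be peeled off equal orbit points
lemma pvPeel (array : List Int) (h : array ≠ [])
    (hinj : ∀ x y : Int, 0 ≤ x → x < (array.length : Int) → 0 ≤ y → y < (array.length : Int) →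
      pvStep array x = pvStep array y → x = y) :
    ∀ (d i j : Nat), pvOrb array (i + d) = pvOrb array (j + d) → pvOrb array i = pvOrb array j := by
  intro d
  induction d with
  | zero => intro i j hij; simpa using hij
  | succ d ih =>
    intro i j hij
    apply ih
    have hi := pvOrb_range array h (i + d)
    have hj := pvOrb_range array h (j + d)
    exact hinj _ _ hi.1 hi.2 hj.1 hj.2 (by simpa [pvOrb, Nat.add_succ] using hij)

-- a duplicate-free n-point orbit prefix covers every index
lemma pvCover (array : List Int) (h : array ≠ [])
    (hd : (pvL array array.length).Nodup) :
    ∀ x : Int, 0 ≤ x → x < (array.length : Int) → x ∈ pvL array array.length := by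
  have hsub : pvL array array.length ⊆ PySem.List.pyRange 0 (array.length : Int) 1 := by
    intro y hy
    obtain ⟨k, -, rfl⟩ := (pvL_mem array _ y).mp hy
    exact PySem.List.mem_pyRange_one.mpr (pvOrb_range array h k)
  have hlen : (PySem.List.pyRange 0 (array.length : Int) 1).length ≤
      (pvL array array.length).length := by
    rw [pvL_length, PySem.List.length_pyRange_one]
    omega
  have hperm := List.Subperm.perm_of_length_le (List.Nodup.subperm hd hsub) hlen
  intro x hx0 hx1
  exact hperm.symm.mem_iff.mp (PySem.List.mem_pyRange_one.mpr ⟨hx0, hx1⟩)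

-- A's success conditions make the first n orbit points pairwise distinct
lemma pvNodup_of_A (array : List Int)
    (h1 : pvOrb array array.length = 0)
    (h2 : ∀ j, 0 < j → j < array.length → pvOrb array j ≠ 0) :
    (pvL array array.length).Nodup := by
  have key : ∀ a b : Nat, a < array.length → b < array.length → a < b →
      pvOrb array a = pvOrb array b → False := by
    intro a b ha hb hab he
    have hsh := pvOrb_congr_add array he (array.length - b)
    have hbn : b + (array.length - b) = array.length := by omega
    rw [hbn, h1] at hsh
    exact h2 (a + (array.length - b)) (by omega) (by omega) hsh
  apply List.Nodup.map_on ?_ (List.nodup_range)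
  intro a ha b hb he
  rcases Nat.lt_trichotomy a b with hl | hl | hl
  · exact absurd he (fun he => key a b (List.mem_range.mp ha) (List.mem_range.mp hb) hl he)
  · exact hl
  · exact absurd he.symm (fun he => key b a (List.mem_range.mp hb) (List.mem_range.mp ha) hl he)

-- A's success conditions make the step injective on [0, n)
lemma pvInj_of_A (array : List Int) (h : array ≠ [])
    (h1 : pvOrb array array.length = 0)
    (h2 : ∀ j, 0 < j → j < array.length → pvOrb array j ≠ 0) :
    ∀ x y : Int, 0 ≤ x → x < (array.length : Int) → 0 ≤ y → y < (array.length : Int) →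
      pvStep array x = pvStep array y → x = y := by
  have hd := pvNodup_of_A array h1 h2
  have hoinj := List.inj_on_of_nodup_map (l := List.range array.length) (f := pvOrb array)
    (by simpa [pvL] using hd)
  intro x y hx0 hx1 hy0 hy1 hxy
  obtain ⟨a, ha, rfl⟩ := (pvL_mem array _ x).mp (pvCover array h hd x hx0 hx1)
  obtain ⟨b, hb, rfl⟩ := (pvL_mem array _ y).mp (pvCover array h hd y hy0 hy1)
  have hsa : pvStep array (pvOrb array a) = pvOrb array (a + 1) := rfl
  have hsb : pvStep array (pvOrb array b) = pvOrb array (b + 1) := rfl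
  rw [hsa, hsb] at hxy
  by_cases hae : a + 1 = array.length
  · by_cases hbe : b + 1 = array.length
    · congr 1
      omega
    · rw [hae, h1] at hxy
      exact absurd hxy.symm (h2 (b + 1) (by omega) (by omega))
  · by_cases hbe : b + 1 = array.length
    · rw [hbe, h1] at hxy
      exact absurd hxy (h2 (a + 1) (by omega) (by omega))
    · have hab := hoinj (List.mem_range.mpr (by omega)) (List.mem_range.mpr (by omega)) hxy
      congr 1
      omega

-- an injective step map is a permutation of range(n)
lemma pvPerm_of_inj (array : List Int) (h : array ≠ [])
    (hinj : ∀ x y : Int, 0 ≤ x → x < (array.length : Int) → 0 ≤ y → y < (array.length : Int) →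
      pvStep array x = pvStep array y → x = y) :
    (pvSucc array).Perm (PySem.List.pyRange 0 (array.length : Int) 1) := by
  have hnd : (pvSucc array).Nodup := by
    apply List.Nodup.map_on ?_ (PySem.List.nodup_pyRange_one _ _)
    intro x hx y hy he
    obtain ⟨hx0, hx1⟩ := PySem.List.mem_pyRange_one.mp hx
    obtain ⟨hy0, hy1⟩ := PySem.List.mem_pyRange_one.mp hy
    exact hinj x y hx0 hx1 hy0 hy1 he
  have hsub : pvSucc array ⊆ PySem.List.pyRange 0 (array.length : Int) 1 := by
    intro y hy
    obtain ⟨i, -, rfl⟩ := List.mem_map.mp hy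
    exact PySem.List.mem_pyRange_one.mpr (pvStep_range array h i)
  apply List.Subperm.perm_of_length_le (List.Nodup.subperm hnd hsub)
  rw [PySem.List.length_pyRange_one]
  simp [pvSucc, PySem.List.length_pyRange_one]

-- B unfolded, for nonempty input
lemma pvAlt_eq (array : List Int) (h : array ≠ []) :
    hasSingleCycle_alt array =
      ((PySem.List.sorted (pvSucc array) (fun x => x) false
          == PySem.List.pyRange 0 (array.length : Int) 1) &&
        (PySem.Set.len (bfsLoop (pvSucc array) array.length
            (PySem.Set.ofList [0]) (PySem.Set.ofList [0])) == (array.length : Int))) := by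
  unfold hasSingleCycle_alt
  rw [if_neg (by simpa using h)]
  by_cases htest : (PySem.List.sorted (pvSucc array) (fun x => x) false
      == PySem.List.pyRange 0 (array.length : Int) 1) = true
  · show (if !(PySem.List.sorted (pvSucc array) (fun x => x) false
        == PySem.List.pyRange 0 (array.length : Int) 1) then false else _) = _
    rw [htest]
    simp only [Bool.not_true, Bool.false_eq_true, if_false, Bool.true_and]
    rfl
  · show (if !(PySem.List.sorted (pvSucc array) (fun x => x) false
        == PySem.List.pyRange 0 (array.length : Int) 1) then false else _) = _
    rw [Bool.not_eq_true] at htest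
    rw [htest]
    simp

-- pvL at 1 is the starting set {0}
lemma pvL_one (array : List Int) : pvL array 1 = [0] := by
  simp [pvL, pvOrb]

-- the first n orbit points are duplicate-free as soon as no earlier point repeats
lemma pvNodup_of_min (array : List Int) (m : Nat)
    (hmin : ∀ k, k < m → pvOrb array k ∉ pvL array k) : (pvL array m).Nodup := by
  apply List.Nodup.map_on ?_ (List.nodup_range)
  intro a ha b hb he
  rcases Nat.lt_trichotomy a b with hl | hl | hl
  · exact absurd ((pvL_mem array b _).mpr ⟨a, hl, he⟩) (hmin b (List.mem_range.mp hb))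
  · exact hl
  · exact absurd ((pvL_mem array a _).mpr ⟨b, hl, he.symm⟩) (hmin a (List.mem_range.mp ha))

-- ===== VERDICT (by name: the statement is the Claim_ definition above) =====
theorem hasSingleCycle_spec : Claim_equal_hasSingleCycle := by
  intro array _
  unfold Spec_hasSingleCycle
  by_cases h : array = []
  · subst h; decide
  · have hn : 0 < array.length := List.length_pos_iff.mpr h
    rw [pvAlt_eq array h]
    apply Bool.eq_iff_iff.mpr
    rw [Bool.and_eq_true, pvSortedTest_iff, beq_iff_eq, pvA_iff array h]
    constructor
    · rintro ⟨h1, h2⟩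
      have hd := pvNodup_of_A array h1 h2
      have hinj := pvInj_of_A array h h1 h2
      have hrep : pvOrb array array.length ∈ pvL array array.length := by
        rw [h1]
        exact (pvL_mem array _ 0).mpr ⟨0, hn, rfl⟩
      have hbfs := pvBFS array h array.length hd hrep array.length 0 hn (by omega)
      rw [pvL_one] at hbfs
      simp only [show pvOrb array 0 = (0 : Int) from rfl] at hbfs
      refine ⟨pvPerm_of_inj array h hinj, ?_⟩
      rw [pvSet_ofList_singleton, hbfs]
      simp [PySem.Set.len, pvL_length]
    · rintro ⟨hperm, hlen⟩
      have hinj := pvInj_of_perm array hperm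
      -- some orbit point repeats (at step n at the latest)
      have hex : ∃ m, pvOrb array m ∈ pvL array m := by
        by_cases hnd : (pvL array array.length).Nodup
        · refine ⟨array.length, ?_⟩
          have hr := pvOrb_range array h array.length
          exact pvCover array h hnd _ hr.1 hr.2
        · by_contra hno
          push Not at hno
          exact hnd (pvNodup_of_min array array.length (fun k _ => hno k))
      -- the first repeat, at step m0 ≤ n
      have hrep : pvOrb array (Nat.find hex) ∈ pvL array (Nat.find hex) := Nat.find_spec hex
      have hmin : ∀ k, k < Nat.find hex → pvOrb array k ∉ pvL array k :=
        fun k hk => Nat.find_min hex hk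
      have hm0pos : 0 < Nat.find hex := by
        rcases Nat.eq_zero_or_pos (Nat.find hex) with h0 | h0
        · rw [h0] at hrep
          simp [pvL] at hrep
        · exact h0
      have hm0le : Nat.find hex ≤ array.length := by
        by_cases hnd : (pvL array array.length).Nodup
        · apply Nat.find_min' hex
          have hr := pvOrb_range array h array.length
          exact pvCover array h hnd _ hr.1 hr.2
        · by_contra hgt
          exact hnd (pvNodup_of_min array array.length
            (fun k hk => hmin k (by omega)))
      have hdm0 : (pvL array (Nat.find hex)).Nodup := pvNodup_of_min array _ hmin
      -- the BFS closure is exactly the m0-point prefix, so m0 = n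
      have hbfs := pvBFS array h (Nat.find hex) hdm0 hrep array.length 0 hm0pos (by omega)
      rw [pvL_one] at hbfs
      simp only [show pvOrb array 0 = (0 : Int) from rfl] at hbfs
      rw [pvSet_ofList_singleton, hbfs] at hlen
      have hm0n : Nat.find hex = array.length := by
        simp [PySem.Set.len, pvL_length] at hlen
        exact_mod_cast hlen
      rw [hm0n] at hrep hdm0
      -- the repeat must close at index 0, so the orbit first returns to 0 at step n
      obtain ⟨j, hj, hje⟩ := (pvL_mem array _ _).mp hrep
      have hj0 : j = 0 := by
        by_contra hj0
        have hpe := pvPeel array h hinj j (array.length - j) 0 (by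
          rw [Nat.zero_add, Nat.sub_add_cancel (by omega)]
          exact hje.symm)
        have hinL : pvOrb array (array.length - j) = pvOrb array 0 := by simpa [pvOrb] using hpe
        have hoinj := List.inj_on_of_nodup_map (l := List.range array.length)
          (f := pvOrb array) (by simpa [pvL] using hdm0)
        have : array.length - j = 0 := hoinj
          (List.mem_range.mpr (by omega)) (List.mem_range.mpr (by omega)) hinL
        omega
      subst hj0
      have h1 : pvOrb array array.length = 0 := by simpa [pvOrb] using hje.symm
      refine ⟨h1, ?_⟩
      intro j hj0 hjn hzero
      have hoinj := List.inj_on_of_nodup_map (l := List.range array.length)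
        (f := pvOrb array) (by simpa [pvL] using hdm0)
      have : j = 0 := hoinj (List.mem_range.mpr hjn) (List.mem_range.mpr hn)
        (by simpa [pvOrb] using hzero)
      omega
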